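-- pv_equiv track=rewrite | github.com/bob686868/Leetcode-100-day-challenge- | day28.py | findAllPossibleRecipes
-- ===== SOURCE A (Python) =====
-- def findAllPossibleRecipes(recipes,ingredients,supplies):
--     supplies=set(supplies)
--     notReachable=set()
--     edges={}
--
--     ## build graph
--
--     for i,r in enumerate(recipes):
--         if r not in edges:
--             edges[r]=[]
--         for ingredient in ingredients[i]:
--             edges[r].append(ingredient)
--
--     def canPrepare(recipe):
--         if recipe in supplies:return True
--         if recipe in notReachable:return False
--         if recipe not in edges:return False
--
--         notReachable.add(recipe)
--         for ing in edges[recipe]: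
--             if not canPrepare(ing):
--                 return False
--             supplies.add(ing)
--         notReachable.remove(recipe)
--
--         return True
--
--     result=[]
--     for r in recipes:
--         if canPrepare(r):
--             result.append(r)
--
--     return result
-- ===== SOURCE B (Python) =====
-- def findAllPossibleRecipes(recipes, ingredients, supplies):
--     # Round-based saturation (fixpoint iteration) instead of A's memoized DFS.
--     need = {}
--     for r, ings in zip(recipes, ingredients):
--         need.setdefault(r, []).extend(ings)
--     avail = set(supplies)
--     changed = True
--     while changed:
--         changed = False
--         for r, ings in need.items():
--             if r not in avail and all(i in avail for i in ings):
--                 avail.add(r)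
--                 changed = True
--     return [r for r in recipes if r in avail]
-- ===== Notes on version B (the rewrite author's own statement) =====
-- stated objective: alternative
-- what changed: Replaced the memoized depth-first search with in-progress poisoning (recursive canPrepare over a mutable supplies/notReachable pair) by round-based fixpoint saturation: repeatedly sweep the merged recipe->ingredients map, adding every recipe whose ingredients are all available, until a sweep changes nothing, then filter the original recipes list by availability.
import Mathlib
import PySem

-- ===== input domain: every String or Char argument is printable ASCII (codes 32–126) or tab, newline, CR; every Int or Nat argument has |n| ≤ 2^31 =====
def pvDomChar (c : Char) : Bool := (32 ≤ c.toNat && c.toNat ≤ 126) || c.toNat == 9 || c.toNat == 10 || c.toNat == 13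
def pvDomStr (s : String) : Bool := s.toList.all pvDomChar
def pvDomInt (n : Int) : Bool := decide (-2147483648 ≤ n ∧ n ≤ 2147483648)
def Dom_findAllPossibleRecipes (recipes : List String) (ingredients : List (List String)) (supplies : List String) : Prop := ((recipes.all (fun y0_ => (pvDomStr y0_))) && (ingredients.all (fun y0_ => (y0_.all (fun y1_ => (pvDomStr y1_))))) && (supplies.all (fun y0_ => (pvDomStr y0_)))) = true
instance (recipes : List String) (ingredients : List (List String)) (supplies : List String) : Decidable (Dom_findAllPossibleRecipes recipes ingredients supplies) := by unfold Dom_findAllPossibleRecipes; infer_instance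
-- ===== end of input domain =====

-- B replaces A's memoized depth-first search (with in-progress poisoning) by round-based
-- fixpoint saturation over an availability set; equivalence of the RETURN values is proved
-- on inputs with enough ingredient lists (A raises IndexError otherwise).

-- ===== PORT A =====
-- graph build: for i,r in enumerate(recipes): if r not in edges: edges[r]=[]; for ing in ingredients[i]: edges[r].append(ing)
-- (ingredients[i] is in range under Pre_, so the total pyGetD form is exact there)
def pvBuildA (ingredients : List (List String)) : Nat → List String → PySem.Dict String (List String) → PySem.Dict String (List String)
  | _, [], d => d
  | i, r :: rs, d =>
      let d1 := if d.contains r then d else d.insert r []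
      let d2 := (PySem.List.pyGetD ingredients (i : Int) []).foldl (fun d' ing => d'.modify r [] (· ++ [ing])) d1
      pvBuildA ingredients (i + 1) rs d2

-- canPrepare: fuel-based recursion; fuel `edges.keys.length + 1` is never exhausted because every
-- recursive call first adds a fresh key of `edges` to notReachable (proved in the lemmas below)
mutual
def pvCanPrepare (edges : PySem.Dict String (List String)) : Nat → String → PySem.Set String → PySem.Set String → Bool × PySem.Set String × PySem.Set String
  | 0, _, S, N => (false, S, N)
  | fuel + 1, r, S, N =>
      if S.contains r then (true, S, N)
      else if N.contains r then (false, S, N)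
      else
        match edges.get? r with
        | none => (false, S, N)
        | some lst =>
            match pvForIngs edges fuel lst S (PySem.Set.add N r) with
            | (true, S2, N2) => (true, S2, PySem.Set.discard N2 r)
            | (false, S2, N2) => (false, S2, N2)
  termination_by fuel _ _ _ => (fuel, 0)
def pvForIngs (edges : PySem.Dict String (List String)) : Nat → List String → PySem.Set String → PySem.Set String → Bool × PySem.Set String × PySem.Set String
  | _, [], S, N => (true, S, N)
  | fuel, ing :: rest, S, N =>
      match pvCanPrepare edges fuel ing S N with
      | (true, S', N') => pvForIngs edges fuel rest (PySem.Set.add S' ing) N'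
      | (false, S', N') => (false, S', N')
  termination_by fuel lst _ _ => (fuel, lst.length + 1)
end

-- result=[]; for r in recipes: if canPrepare(r): result.append(r)
def pvTopLoop (edges : PySem.Dict String (List String)) (fuel : Nat) : List String → PySem.Set String → PySem.Set String → List String → List String
  | [], _, _, res => res
  | r :: rs, S, N, res =>
      match pvCanPrepare edges fuel r S N with
      | (true, S', N') => pvTopLoop edges fuel rs S' N' (res ++ [r])
      | (false, S', N') => pvTopLoop edges fuel rs S' N' res

def findAllPossibleRecipes (recipes : List String) (ingredients : List (List String)) (supplies : List String) : List String :=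
  let suppliesSet := PySem.Set.ofList supplies
  let edges := pvBuildA ingredients 0 recipes PySem.Dict.empty
  pvTopLoop edges (edges.keys.length + 1) recipes suppliesSet PySem.Set.empty []

-- ===== PORT B =====
-- for r, ings in zip(recipes, ingredients): need.setdefault(r, []).extend(ings)
-- (setdefault(...).extend(...) mutates the stored list: one modify that appends ings)
def pvBuildB : List (String × List String) → PySem.Dict String (List String) → PySem.Dict String (List String)
  | [], d => d
  | (r, ings) :: rest, d => pvBuildB rest ((d.setdefault r []).modify r [] (· ++ ings))

-- one pass of the inner for-loop over need.items()
def pvPass : List (String × List String) → PySem.Set String → Bool → PySem.Set String × Bool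
  | [], avail, changed => (avail, changed)
  | (r, ings) :: rest, avail, changed =>
      if !avail.contains r && ings.all (fun i => avail.contains i)
      then pvPass rest (PySem.Set.add avail r) true
      else pvPass rest avail changed

-- while changed: — fuel `need.size + 1` is never exhausted: every continuing pass adds a key
def pvSatLoop (items : List (String × List String)) : Nat → PySem.Set String → PySem.Set String
  | 0, avail => avail
  | fuel + 1, avail =>
      match pvPass items avail false with
      | (a', true) => pvSatLoop items fuel a'
      | (a', false) => a'

def findAllPossibleRecipes_alt (recipes : List String) (ingredients : List (List String)) (supplies : List String) : List String :=
  let need := pvBuildB (recipes.zip ingredients) PySem.Dict.empty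
  let avail := pvSatLoop need.items (need.size + 1) (PySem.Set.ofList supplies)
  recipes.filter (fun r => avail.contains r)

-- ===== PRECONDITION & SPEC =====
-- Pre_ excludes inputs with fewer ingredient lists than recipes, on which A raises IndexError at ingredients[i].
def Pre_findAllPossibleRecipes (recipes : List String) (ingredients : List (List String)) (supplies : List String) : Prop :=
  recipes.length ≤ ingredients.length
instance (recipes : List String) (ingredients : List (List String)) (supplies : List String) : Decidable (Pre_findAllPossibleRecipes recipes ingredients supplies) := by unfold Pre_findAllPossibleRecipes; infer_instance
def pvWitness_findAllPossibleRecipes : List String × List (List String) × List String := (["cake"], [["flour"]], ["flour"])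

def Spec_findAllPossibleRecipes (recipes : List String) (ingredients : List (List String)) (supplies : List String) (out : List String) : Prop := out = findAllPossibleRecipes_alt recipes ingredients supplies
instance (recipes : List String) (ingredients : List (List String)) (supplies : List String) (out : List String) : Decidable (Spec_findAllPossibleRecipes recipes ingredients supplies out) := by unfold Spec_findAllPossibleRecipes; infer_instance

-- ===== CLAIM (what is proved, stated in full; the proofs are below) =====
def Claim_equal_findAllPossibleRecipes : Prop := ∀ (recipes : List String) (ingredients : List (List String)) (supplies : List String), Dom_findAllPossibleRecipes recipes ingredients supplies → Pre_findAllPossibleRecipes recipes ingredients supplies → Spec_findAllPossibleRecipes recipes ingredients supplies (findAllPossibleRecipes recipes ingredients supplies)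
-- ===== LEMMAS AND PROOFS =====

-- "x is derivable": x is a base supply, or x is a recipe all of whose ingredients are derivable
inductive pvMk (edges : PySem.Dict String (List String)) (supplies : List String) : String → Prop
  | base {x : String} : x ∈ supplies → pvMk edges supplies x
  | step {x : String} {l : List String} : edges.get? x = some l → (∀ i ∈ l, pvMk edges supplies i) → pvMk edges supplies x

-- a nonempty dependency path through non-supply nodes
inductive pvReach (edges : PySem.Dict String (List String)) (supplies : List String) : String → String → Prop
  | single {x y : String} {l : List String} : x ∉ supplies → edges.get? x = some l → y ∈ l → pvReach edges supplies x y
  | cons {x y z : String} {l : List String} : x ∉ supplies → edges.get? x = some l → y ∈ l → pvReach edges supplies y z → pvReach edges supplies x z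

-- the DFS stack (most recent first): consecutive dependency edges through non-supply nodes, ending at r
inductive pvChain (edges : PySem.Dict String (List String)) (supplies : List String) : List String → String → Prop
  | nil {r : String} : pvChain edges supplies [] r
  | cons {p r : String} {rest : List String} {l : List String} : p ∉ supplies → edges.get? p = some l → r ∈ l → pvChain edges supplies rest p → pvChain edges supplies (p :: rest) r

theorem pvReach_snoc (edges : PySem.Dict String (List String)) (supplies : List String) {x y z : String} {l : List String}
    (h : pvReach edges supplies x y) (hy : y ∉ supplies) (hl : edges.get? y = some l) (hz : z ∈ l) :
    pvReach edges supplies x z := by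
  induction h with
  | single h1 h2 h3 => exact pvReach.cons h1 h2 h3 (pvReach.single hy hl hz)
  | cons h1 h2 h3 _ ih => exact pvReach.cons h1 h2 h3 (ih hy hl)

theorem pvNoCycle (edges : PySem.Dict String (List String)) (supplies : List String) {x : String}
    (h : pvMk edges supplies x) (hr : pvReach edges supplies x x) : False := by
  revert hr
  induction h with
  | base hx =>
      intro hr
      cases hr with
      | single h1 _ _ => exact h1 hx
      | cons h1 _ _ _ => exact h1 hx
  | step hget hall ih =>
      intro hr
      cases hr with
      | single h1 h2 h3 =>
          rw [hget] at h2; cases h2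
          exact ih _ h3 (pvReach.single h1 hget h3)
      | cons h1 h2 h3 h4 =>
          rw [hget] at h2; cases h2
          exact ih _ h3 (pvReach_snoc _ _ h4 h1 hget h3)

theorem pvChain_reach (edges : PySem.Dict String (List String)) (supplies : List String) {stk : List String} {r : String}
    (h : pvChain edges supplies stk r) : ∀ x ∈ stk, pvReach edges supplies x r := by
  induction h with
  | nil => intro x hx; cases hx
  | cons h1 h2 h3 _ ih =>
      intro x hx
      rcases List.mem_cons.mp hx with rfl | hx'
      · exact pvReach.single h1 h2 h3
      · exact pvReach_snoc _ _ (ih x hx') h1 h2 h3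

def pvGoodS (edges : PySem.Dict String (List String)) (supplies : List String) (S : PySem.Set String) : Prop :=
  (∀ x ∈ supplies, x ∈ S) ∧ (∀ x ∈ S, pvMk edges supplies x)

def pvGoodN (edges : PySem.Dict String (List String)) (supplies : List String) (stk : List String) (N : PySem.Set String) : Prop :=
  ∀ x ∈ N, x ∈ stk ∨ ¬ pvMk edges supplies x

def pvCnt (edges : PySem.Dict String (List String)) (N : List String) : Nat :=
  edges.keys.countP (fun k => !N.contains k)

theorem pvCnt_mono (edges : PySem.Dict String (List String)) {N N' : List String}
    (h : ∀ x ∈ N, x ∈ N') : pvCnt edges N' ≤ pvCnt edges N := by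
  apply List.countP_mono_left
  intro k _ hk
  simp only [Bool.not_eq_eq_eq_not, Bool.not_true, List.contains_eq_mem, decide_eq_false_iff_not] at hk ⊢
  exact fun hm => hk (h k hm)

theorem pvCnt_lt_add (edges : PySem.Dict String (List String)) {N : PySem.Set String} {r : String}
    (hk : r ∈ edges.keys) (hn : r ∉ N) : pvCnt edges (PySem.Set.add N r) < pvCnt edges N := by
  unfold pvCnt
  rw [PySem.Set.add_of_not_mem hn]
  revert hk
  generalize edges.keys = ks
  intro hk
  induction ks with
  | nil => cases hk
  | cons k ks ih =>
      have hmono : ks.countP (fun x => !List.contains (N ++ [r]) x) ≤ ks.countP (fun x => !List.contains N x) := by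
        apply List.countP_mono_left
        intro x _ hx
        simp only [Bool.not_eq_eq_eq_not, Bool.not_true, List.contains_eq_mem,
          decide_eq_false_iff_not, List.mem_append, List.mem_singleton] at hx ⊢
        exact fun hm => hx (Or.inl hm)
      rcases List.mem_cons.mp hk with rfl | hk'
      · rw [List.countP_cons_of_neg (p := fun x => !List.contains (N ++ [r]) x) (by simp),
            List.countP_cons_of_pos (p := fun x => !List.contains N x) (by simp [hn])]
        omega
      · have h3 := ih hk'
        by_cases hm : k ∈ N
        · rw [List.countP_cons_of_neg (p := fun x => !List.contains (N ++ [r]) x) (by simp [hm]),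
              List.countP_cons_of_neg (p := fun x => !List.contains N x) (by simp [hm])]
          exact h3
        · by_cases hm2 : k = r
          · subst hm2
            rw [List.countP_cons_of_neg (p := fun x => !List.contains (N ++ [k]) x) (by simp),
                List.countP_cons_of_pos (p := fun x => !List.contains N x) (by simp [hm])]
            omega
          · rw [List.countP_cons_of_pos (p := fun x => !List.contains (N ++ [r]) x) (by simp [hm, hm2]),
                List.countP_cons_of_pos (p := fun x => !List.contains N x) (by simp [hm])]
            omega

def pvCanSpecP (edges : PySem.Dict String (List String)) (supplies : List String) (fu : Nat) : Prop :=
  ∀ r S N stk b S' N', pvGoodS edges supplies S → pvGoodN edges supplies stk N → pvChain edges supplies stk r →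
    pvCnt edges N < fu → pvCanPrepare edges fu r S N = (b, S', N') →
    (∀ x ∈ S, x ∈ S') ∧ (∀ x ∈ N, x ∈ N') ∧ pvGoodS edges supplies S' ∧ pvGoodN edges supplies stk N' ∧
    (b = true ↔ pvMk edges supplies r)

theorem pvFor_spec (edges : PySem.Dict String (List String)) (supplies : List String) (fu : Nat)
    (HC : pvCanSpecP edges supplies fu) :
    ∀ (lst : List String) (r : String) (stk : List String) (l : List String),
      edges.get? r = some l → (∀ i ∈ lst, i ∈ l) → r ∉ supplies → pvChain edges supplies stk r →
      ∀ S N b S' N', pvGoodS edges supplies S → pvGoodN edges supplies (r :: stk) N → pvCnt edges N < fu →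
        pvForIngs edges fu lst S N = (b, S', N') →
        (∀ x ∈ S, x ∈ S') ∧ (∀ x ∈ N, x ∈ N') ∧ pvGoodS edges supplies S' ∧ pvGoodN edges supplies (r :: stk) N' ∧
        (b = true → ∀ i ∈ lst, pvMk edges supplies i) ∧ (b = false → ¬ ∀ i ∈ lst, pvMk edges supplies i) := by
  intro lst
  induction lst with
  | nil =>
      intro r stk l hget hsub hrs hch S N b S' N' hS hN hcnt heq
      simp only [pvForIngs, Prod.mk.injEq] at heq
      obtain ⟨rfl, rfl, rfl⟩ := heq
      exact ⟨fun x hx => hx, fun x hx => hx, hS, hN, fun _ i hi => absurd hi (List.not_mem_nil),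
        fun hb => nomatch hb⟩
  | cons ing rest ih =>
      intro r stk l hget hsub hrs hch S N b S' N' hS hN hcnt heq
      simp only [pvForIngs] at heq
      rcases hcall : pvCanPrepare edges fu ing S N with ⟨bi, Si, Ni⟩
      rw [hcall] at heq
      have hching : pvChain edges supplies (r :: stk) ing :=
        pvChain.cons hrs hget (hsub ing List.mem_cons_self) hch
      obtain ⟨mS, mN, GS, GN, hiff⟩ := HC ing S N (r :: stk) bi Si Ni hS hN hching hcnt hcall
      cases bi
      · dsimp only at heq
        simp only [Prod.mk.injEq] at heq
        obtain ⟨rfl, rfl, rfl⟩ := heq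
        have hnm : ¬ pvMk edges supplies ing := fun hm => nomatch hiff.mpr hm
        refine ⟨mS, mN, GS, GN, fun hb => absurd hb Bool.false_ne_true, ?_⟩
        intro _ hall
        exact hnm (hall ing List.mem_cons_self)
      · dsimp only at heq
        have hMk : pvMk edges supplies ing := hiff.mp rfl
        have hS2 : pvGoodS edges supplies (PySem.Set.add Si ing) := by
          refine ⟨fun x hx => (PySem.Set.mem_add _ _ _).mpr (Or.inl (GS.1 x hx)), ?_⟩
          intro x hx
          rcases (PySem.Set.mem_add _ _ _).mp hx with hx' | hx2
          · exact GS.2 x hx'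
          · exact hx2 ▸ hMk
        have hcnt2 : pvCnt edges Ni < fu := by
          have := pvCnt_mono edges mN
          omega
        obtain ⟨mS2, mN2, GS', GN', hT, hF⟩ :=
          ih r stk l hget (fun i hi => hsub i (List.mem_cons_of_mem _ hi)) hrs hch
            (PySem.Set.add Si ing) Ni b S' N' hS2 GN hcnt2 heq
        refine ⟨fun x hx => mS2 x ((PySem.Set.mem_add _ _ _).mpr (Or.inl (mS x hx))),
          fun x hx => mN2 x (mN x hx), GS', GN', ?_, ?_⟩
        · intro hb i hi
          rcases List.mem_cons.mp hi with rfl | hi'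
          · exact hMk
          · exact hT hb i hi'
        · intro hb hall
          exact hF hb fun i hi => hall i (List.mem_cons_of_mem _ hi)

theorem pvCan_spec (edges : PySem.Dict String (List String)) (supplies : List String) :
    ∀ fu : Nat, pvCanSpecP edges supplies fu := by
  intro fu
  induction fu with
  | zero => intro r S N stk b S' N' _ _ _ hcnt _; exact absurd hcnt (Nat.not_lt_zero _)
  | succ fu ih =>
      intro r S N stk b S' N' hS hN hch hcnt heq
      simp only [pvCanPrepare] at heq
      by_cases hSr : S.contains r = true
      · rw [if_pos hSr] at heq
        simp only [Prod.mk.injEq] at heq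
        obtain ⟨rfl, rfl, rfl⟩ := heq
        exact ⟨fun x hx => hx, fun x hx => hx, hS, hN,
          ⟨fun _ => hS.2 r ((PySem.Set.contains_iff _ _).mp hSr), fun _ => rfl⟩⟩
      · rw [if_neg hSr] at heq
        have hrS : r ∉ S := fun hm => hSr ((PySem.Set.contains_iff _ _).mpr hm)
        have hrsup : r ∉ supplies := fun hm => hrS (hS.1 r hm)
        by_cases hNr : N.contains r = true
        · rw [if_pos hNr] at heq
          simp only [Prod.mk.injEq] at heq
          obtain ⟨rfl, rfl, rfl⟩ := heq
          have hnm : ¬ pvMk edges supplies r := by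
            rcases hN r ((PySem.Set.contains_iff _ _).mp hNr) with hstk | hnm
            · intro hm
              exact pvNoCycle edges supplies hm (pvChain_reach edges supplies hch r hstk)
            · exact hnm
          exact ⟨fun x hx => hx, fun x hx => hx, hS, hN, by simp [hnm]⟩
        · rw [if_neg hNr] at heq
          have hrN : r ∉ N := fun hm => hNr ((PySem.Set.contains_iff _ _).mpr hm)
          rcases hg : edges.get? r with _ | lst
          · rw [hg] at heq
            simp only [Prod.mk.injEq] at heq
            obtain ⟨rfl, rfl, rfl⟩ := heq
            have hnm : ¬ pvMk edges supplies r := by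
              intro hm
              cases hm with
              | base h => exact hrsup h
              | step hget _ => rw [hg] at hget; cases hget
            exact ⟨fun x hx => hx, fun x hx => hx, hS, hN, by simp [hnm]⟩
          · rw [hg] at heq
            dsimp only at heq
            have hrkeys : r ∈ edges.keys := by
              by_contra hc
              rw [(PySem.Dict.get?_eq_none_iff_not_mem_keys edges r).mpr hc] at hg
              cases hg
            have hGN' : pvGoodN edges supplies (r :: stk) (PySem.Set.add N r) := by
              intro x hx
              rcases (PySem.Set.mem_add _ _ _).mp hx with hx' | hx2
              · rcases hN x hx' with h1 | h2
                · exact Or.inl (List.mem_cons_of_mem _ h1)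
                · exact Or.inr h2
              · exact Or.inl (hx2 ▸ List.mem_cons_self)
            have hcnt2 : pvCnt edges (PySem.Set.add N r) < fu := by
              have := pvCnt_lt_add edges hrkeys hrN
              omega
            rcases hfor : pvForIngs edges fu lst S (PySem.Set.add N r) with ⟨bf, S2, N2⟩
            rw [hfor] at heq
            obtain ⟨mS, mN, GS, GN, hT, hF⟩ :=
              pvFor_spec edges supplies fu ih lst r stk lst hg (fun i hi => hi) hrsup hch
                S (PySem.Set.add N r) bf S2 N2 hS hGN' hcnt2 hfor
            cases bf
            · dsimp only at heq
              simp only [Prod.mk.injEq] at heq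
              obtain ⟨rfl, rfl, rfl⟩ := heq
              have hnm : ¬ pvMk edges supplies r := by
                intro hm
                cases hm with
                | base h => exact hrsup h
                | step hget hall =>
                    rw [hg] at hget
                    exact hF rfl (by injection hget with h; exact h ▸ hall)
              refine ⟨mS, fun x hx => mN x ((PySem.Set.mem_add _ _ _).mpr (Or.inl hx)), GS, ?_, by simp [hnm]⟩
              intro x hx
              rcases GN x hx with h1 | h2
              · rcases List.mem_cons.mp h1 with rfl | h1'
                · exact Or.inr hnm
                · exact Or.inl h1'
              · exact Or.inr h2
            · dsimp only at heq
              simp only [Prod.mk.injEq] at heq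
              obtain ⟨rfl, rfl, rfl⟩ := heq
              have hmk : pvMk edges supplies r := pvMk.step hg (hT rfl)
              refine ⟨mS, ?_, GS, ?_, by simp [hmk]⟩
              · intro x hx
                have hx2 : x ∈ N2 := mN x ((PySem.Set.mem_add _ _ _).mpr (Or.inl hx))
                exact (PySem.Set.mem_discard _ _ _).mpr ⟨hx2, fun he => hrN (he ▸ hx)⟩
              · intro x hx
                obtain ⟨hx2, hne⟩ := (PySem.Set.mem_discard _ _ _).mp hx
                rcases GN x hx2 with h1 | h2
                · rcases List.mem_cons.mp h1 with rfl | h1'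
                  · exact absurd rfl hne
                  · exact Or.inl h1'
                · exact Or.inr h2

theorem pvTop_spec (edges : PySem.Dict String (List String)) (supplies : List String) (q : String → Bool)
    (hq : ∀ x, q x = true ↔ pvMk edges supplies x) :
    ∀ (rs : List String) S N res, pvGoodS edges supplies S → pvGoodN edges supplies [] N →
      pvTopLoop edges (edges.keys.length + 1) rs S N res = res ++ rs.filter q := by
  intro rs
  induction rs with
  | nil => intro S N res _ _; simp [pvTopLoop]
  | cons r rs ih =>
      intro S N res hS hN
      rcases hcall : pvCanPrepare edges (edges.keys.length + 1) r S N with ⟨b, S', N'⟩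
      have hcnt : pvCnt edges N < edges.keys.length + 1 :=
        Nat.lt_succ_of_le (by unfold pvCnt; exact List.countP_le_length)
      obtain ⟨_, _, GS, GN, hiff⟩ :=
        pvCan_spec edges supplies (edges.keys.length + 1) r S N [] b S' N' hS hN pvChain.nil hcnt hcall
      simp only [pvTopLoop]
      rw [hcall]
      cases b
      · dsimp only
        have hqf : q r = false := by
          rcases Bool.eq_false_or_eq_true (q r) with h' | h'
          · exact absurd ((hq r).mp h') fun hm => nomatch hiff.mpr hm
          · exact h'
        rw [ih S' N' res GS GN]
        simp [hqf]
      · dsimp only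
        have hqt : q r = true := (hq r).mpr (hiff.mp rfl)
        rw [ih S' N' (res ++ [r]) GS GN]
        simp [hqt]

-- B-side lemmas
theorem pvPass_subset : ∀ (items : List (String × List String)) (avail : PySem.Set String) (ch : Bool),
    ∀ x ∈ avail, x ∈ (pvPass items avail ch).1 := by
  intro items
  induction items with
  | nil => intro avail ch x hx; exact hx
  | cons p rest ih =>
      obtain ⟨r, ings⟩ := p
      intro avail ch x hx
      simp only [pvPass]
      split_ifs with h
      · exact ih _ _ x ((PySem.Set.mem_add _ _ _).mpr (Or.inl hx))
      · exact ih _ _ x hx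

theorem pvPass_true : ∀ (items : List (String × List String)) (avail : PySem.Set String),
    (pvPass items avail true).2 = true := by
  intro items
  induction items with
  | nil => intro avail; rfl
  | cons p rest ih =>
      obtain ⟨r, ings⟩ := p
      intro avail
      simp only [pvPass]
      split_ifs with h <;> apply ih

theorem pvPass_sound (edges : PySem.Dict String (List String)) (supplies : List String) :
    ∀ (items : List (String × List String)) (avail : PySem.Set String) (ch : Bool),
      (∀ p ∈ items, edges.get? p.1 = some p.2) → (∀ x ∈ avail, pvMk edges supplies x) →
      ∀ x ∈ (pvPass items avail ch).1, pvMk edges supplies x := by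
  intro items
  induction items with
  | nil => intro avail ch _ hav x hx; exact hav x hx
  | cons p rest ih =>
      obtain ⟨r, ings⟩ := p
      intro avail ch hitems hav x hx
      simp only [pvPass] at hx
      split_ifs at hx with h
      · refine ih _ _ (fun q hq => hitems q (List.mem_cons_of_mem _ hq)) ?_ x hx
        intro y hy
        rcases (PySem.Set.mem_add _ _ _).mp hy with hy' | hy2
        · exact hav y hy'
        · subst hy2
          refine pvMk.step (hitems (y, ings) List.mem_cons_self) ?_
          intro i hi
          have h2 := (Bool.and_eq_true_iff.mp h).2
          have hcon := List.all_eq_true.mp h2 i hi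
          exact hav i ((PySem.Set.contains_iff _ _).mp hcon)
      · exact ih _ _ (fun q hq => hitems q (List.mem_cons_of_mem _ hq)) hav x hx

theorem pvPass_stable : ∀ (items : List (String × List String)) (avail : PySem.Set String),
    (pvPass items avail false).2 = false →
    (pvPass items avail false).1 = avail ∧ ∀ p ∈ items, (∀ i ∈ p.2, i ∈ avail) → p.1 ∈ avail := by
  intro items
  induction items with
  | nil => intro avail _; exact ⟨rfl, by intro p hp; cases hp⟩
  | cons p rest ih =>
      obtain ⟨r, ings⟩ := p
      intro avail h
      simp only [pvPass] at h ⊢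
      split_ifs at h ⊢ with hc
      · rw [pvPass_true] at h; cases h
      · obtain ⟨heq, hclo⟩ := ih avail h
        refine ⟨heq, ?_⟩
        intro q hq hall
        rcases List.mem_cons.mp hq with rfl | hq'
        · by_contra hr
          apply hc
          have h1 : avail.contains r = false := by
            rcases Bool.eq_false_or_eq_true (avail.contains r) with h' | h'
            · exact absurd ((PySem.Set.contains_iff _ _).mp h') hr
            · exact h'
          have h2 : ings.all (fun i => avail.contains i) = true :=
            List.all_eq_true.mpr fun i hi => (PySem.Set.contains_iff _ _).mpr (hall i hi)
          rw [h1, h2]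
          rfl
        · exact hclo q hq' hall

theorem pvPass_progress (edges : PySem.Dict String (List String)) :
    ∀ (items : List (String × List String)) (avail : PySem.Set String),
      (∀ p ∈ items, p.1 ∈ edges.keys) → (pvPass items avail false).2 = true →
      pvCnt edges (pvPass items avail false).1 < pvCnt edges avail := by
  intro items
  induction items with
  | nil => intro avail _ h; cases h
  | cons p rest ih =>
      obtain ⟨r, ings⟩ := p
      intro avail hkeys h
      simp only [pvPass] at h ⊢
      split_ifs at h ⊢ with hc
      · have hr1 : avail.contains r = false := by
          have := (Bool.and_eq_true_iff.mp hc).1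
          simpa using this
        have hrmem : r ∉ avail := by
          intro hm
          rw [(PySem.Set.contains_iff _ _).mpr hm] at hr1
          cases hr1
        have hlt : pvCnt edges (PySem.Set.add avail r) < pvCnt edges avail :=
          pvCnt_lt_add edges (hkeys (r, ings) List.mem_cons_self) hrmem
        have hsub := pvPass_subset rest (PySem.Set.add avail r) true
        have hmono := pvCnt_mono edges hsub
        omega
      · exact ih avail (fun q hq => hkeys q (List.mem_cons_of_mem _ hq)) h

theorem pvSatLoop_spec (edges : PySem.Dict String (List String)) (supplies : List String)
    (items : List (String × List String))
    (hitems : ∀ p ∈ items, edges.get? p.1 = some p.2) (hkeys : ∀ p ∈ items, p.1 ∈ edges.keys) :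
    ∀ (fu : Nat) (avail : PySem.Set String), pvCnt edges avail < fu →
      (∀ x ∈ avail, x ∈ pvSatLoop items fu avail) ∧
      ((∀ x ∈ avail, pvMk edges supplies x) → ∀ x ∈ pvSatLoop items fu avail, pvMk edges supplies x) ∧
      (∀ p ∈ items, (∀ i ∈ p.2, i ∈ pvSatLoop items fu avail) → p.1 ∈ pvSatLoop items fu avail) := by
  intro fu
  induction fu with
  | zero => intro avail h; exact absurd h (Nat.not_lt_zero _)
  | succ fu ih =>
      intro avail hcnt
      rcases hpass : pvPass items avail false with ⟨a', ch⟩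
      cases ch
      · have hout : pvSatLoop items (fu + 1) avail = a' := by
          simp only [pvSatLoop]; rw [hpass]
        have hst := pvPass_stable items avail (by rw [hpass])
        rw [hpass] at hst
        have ha : a' = avail := hst.1
        subst ha
        rw [hout]
        exact ⟨fun x hx => hx, fun hs => hs, hst.2⟩
      · have hout : pvSatLoop items (fu + 1) avail = pvSatLoop items fu a' := by
          simp only [pvSatLoop]; rw [hpass]
        have hprog := pvPass_progress edges items avail hkeys (by rw [hpass])
        rw [hpass] at hprog
        simp only at hprog
        have hrec := ih a' (by omega)
        have hsub : ∀ x ∈ avail, x ∈ a' := by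
          have := pvPass_subset items avail false
          rw [hpass] at this
          exact this
        rw [hout]
        refine ⟨fun x hx => hrec.1 x (hsub x hx), fun hs => ?_, hrec.2.2⟩
        have hsnd := pvPass_sound edges supplies items avail false hitems hs
        rw [hpass] at hsnd
        exact hrec.2.1 hsnd

theorem pvMk_complete (edges : PySem.Dict String (List String)) (supplies : List String) (O : List String)
    (hclo : ∀ p ∈ edges.items, (∀ i ∈ p.2, i ∈ O) → p.1 ∈ O) (hsup : ∀ x ∈ supplies, x ∈ O) :
    ∀ x, pvMk edges supplies x → x ∈ O := by
  intro x hx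
  induction hx with
  | base h => exact hsup _ h
  | step hget hall ih =>
      exact hclo _ (PySem.Dict.mem_items_of_get?_eq_some _ hget) fun i hi => ih i hi

-- build lemmas
theorem pvInsert_getD_self (d : PySem.Dict String (List String)) (r : String) (dflt : List String)
    (hnd : d.keys.Nodup) (hmem : r ∈ d.keys) : d.insert r (d.getD r dflt) = d := by
  have hc : d.contains r = true := (PySem.Dict.contains_iff_mem_keys _ _).mpr hmem
  apply PySem.Dict.ext
  rw [PySem.Dict.items_insert_of_contains _ _ hc]
  have hpt : ∀ p ∈ d.items, (if (p.1 == r) = true then (r, d.getD r dflt) else p) = p := by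
    intro p hp
    by_cases hpr : p.1 = r
    · have hp2 : (r, p.2) ∈ d.items := by rw [← hpr]; exact hp
      have hg : d.getD r dflt = p.2 := PySem.Dict.getD_of_mem_items _ hp2 hnd dflt
      rw [if_pos (by simp [hpr]), hg, ← hpr]
    · simp [hpr]
  rw [List.map_congr_left hpt]
  exact List.map_id' _

theorem pvFoldModify (r : String) : ∀ (ings : List String) (d : PySem.Dict String (List String)),
    d.keys.Nodup → r ∈ d.keys →
    ings.foldl (fun d' ing => d'.modify r [] (· ++ [ing])) d = d.modify r [] (· ++ ings) := by
  intro ings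
  induction ings with
  | nil =>
      intro d hnd hmem
      simp only [List.foldl_nil, PySem.Dict.modify, List.append_nil]
      exact (pvInsert_getD_self d r [] hnd hmem).symm
  | cons i is ih =>
      intro d hnd hmem
      have hc : d.contains r = true := (PySem.Dict.contains_iff_mem_keys _ _).mpr hmem
      have hkeys : (d.modify r [] (· ++ [i])).keys = d.keys := by
        simp only [PySem.Dict.modify]
        exact PySem.Dict.keys_insert_of_contains _ _ hc
      rw [List.foldl_cons, ih (d.modify r [] (· ++ [i])) (by rw [hkeys]; exact hnd) (by rw [hkeys]; exact hmem)]
      simp only [PySem.Dict.modify, PySem.Dict.getD_insert_self, PySem.Dict.insert_insert_self,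
        List.append_assoc, List.singleton_append]

theorem pvBuild_eq (ingredients : List (List String)) :
    ∀ (rs : List String) (i : Nat) (d : PySem.Dict String (List String)),
      i + rs.length ≤ ingredients.length → d.keys.Nodup →
      pvBuildA ingredients i rs d = pvBuildB (rs.zip (ingredients.drop i)) d := by
  intro rs
  induction rs with
  | nil =>
      intro i d _ _
      simp [pvBuildA, pvBuildB]
  | cons r rs ih =>
      intro i d hlen hnd
      have hi : i < ingredients.length := by simp at hlen; omega
      rw [List.drop_eq_getElem_cons hi]
      simp only [List.zip_cons_cons, pvBuildA, pvBuildB]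
      have hget : PySem.List.pyGetD ingredients (i : Int) [] = ingredients[i] := by
        rw [PySem.List.pyGetD_natCast]
        exact List.getD_eq_getElem _ _ hi
      have hd1 : (if d.contains r then d else d.insert r []) = d.setdefault r [] := by
        by_cases hc : d.contains r = true
        · rw [if_pos hc, PySem.Dict.setdefault_of_contains _ _ hc]
        · simp only [Bool.not_eq_true] at hc
          rw [if_neg (by simp [hc]), PySem.Dict.setdefault_of_not_contains _ _ hc]
      have hnd1 : (d.setdefault r []).keys.Nodup := by
        rw [PySem.Dict.keys_setdefault]
        split_ifs with hc
        · exact hnd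
        · refine List.Nodup.append hnd (List.nodup_singleton r) ?_
          intro x hx hx2
          rw [List.mem_singleton] at hx2
          subst hx2
          exact hc ((PySem.Dict.contains_iff_mem_keys _ _).mpr hx)
      have hmem1 : r ∈ (d.setdefault r []).keys := by
        rw [PySem.Dict.keys_setdefault]
        split_ifs with hc
        · exact (PySem.Dict.contains_iff_mem_keys _ _).mp hc
        · exact List.mem_append_right _ (List.mem_singleton_self r)
      rw [hget, hd1, pvFoldModify r (ingredients[i]) (d.setdefault r []) hnd1 hmem1]
      have hnd2 : ((d.setdefault r []).modify r [] (· ++ ingredients[i])).keys.Nodup := by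
        have : ((d.setdefault r []).modify r [] (· ++ ingredients[i])).keys = (d.setdefault r []).keys := by
          simp only [PySem.Dict.modify]
          exact PySem.Dict.keys_insert_of_contains _ _ ((PySem.Dict.contains_iff_mem_keys _ _).mpr hmem1)
        rw [this]
        exact hnd1
      have := ih (i + 1) ((d.setdefault r []).modify r [] (· ++ ingredients[i])) (by simp at hlen ⊢; omega) hnd2
      exact this

theorem pvBuildB_nodup : ∀ (ps : List (String × List String)) (d : PySem.Dict String (List String)),
    d.keys.Nodup → (pvBuildB ps d).keys.Nodup := by
  intro ps
  induction ps with
  | nil => intro d h; exact h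
  | cons p rest ih =>
      obtain ⟨r, ings⟩ := p
      intro d hnd
      apply ih
      have hmem1 : r ∈ (d.setdefault r []).keys := by
        rw [PySem.Dict.keys_setdefault]
        split_ifs with hc
        · exact (PySem.Dict.contains_iff_mem_keys _ _).mp hc
        · exact List.mem_append_right _ (List.mem_singleton_self r)
      have hk : ((d.setdefault r []).modify r [] (· ++ ings)).keys = (d.setdefault r []).keys := by
        simp only [PySem.Dict.modify]
        exact PySem.Dict.keys_insert_of_contains _ _ ((PySem.Dict.contains_iff_mem_keys _ _).mpr hmem1)
      rw [hk, PySem.Dict.keys_setdefault]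
      split_ifs with hc
      · exact hnd
      · refine List.Nodup.append hnd (List.nodup_singleton r) ?_
        intro x hx hx2
        rw [List.mem_singleton] at hx2
        subst hx2
        exact hc ((PySem.Dict.contains_iff_mem_keys _ _).mpr hx)

-- ===== VERDICT (by name: the statement is the Claim_ definition above) =====
theorem findAllPossibleRecipes_spec : Claim_equal_findAllPossibleRecipes := by
  unfold Claim_equal_findAllPossibleRecipes
  intro recipes ingredients supplies _ hpre
  unfold Spec_findAllPossibleRecipes findAllPossibleRecipes findAllPossibleRecipes_alt
  dsimp only
  set need := pvBuildB (recipes.zip ingredients) PySem.Dict.empty with hneed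
  have hbuild : pvBuildA ingredients 0 recipes PySem.Dict.empty = need := by
    rw [hneed]
    have := pvBuild_eq ingredients recipes 0 PySem.Dict.empty (by simpa using hpre)
      (by rw [PySem.Dict.keys_empty]; exact List.nodup_nil)
    simpa using this
  rw [hbuild]
  have hnd : need.keys.Nodup := pvBuildB_nodup _ _ (by rw [PySem.Dict.keys_empty]; exact List.nodup_nil)
  set O := pvSatLoop need.items (need.size + 1) (PySem.Set.ofList supplies) with hO
  have hitems : ∀ p ∈ need.items, need.get? p.1 = some p.2 := by
    intro p hp
    have hp' : (p.1, p.2) ∈ need.items := by rw [Prod.mk.eta]; exact hp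
    exact PySem.Dict.get?_of_mem_items _ hp' hnd
  have hkeysmem : ∀ p ∈ need.items, p.1 ∈ need.keys := fun p hp => PySem.Dict.mem_keys_of_mem_items _ hp
  have hcnt0 : pvCnt need (PySem.Set.ofList supplies) < need.size + 1 := by
    have h1 : pvCnt need (PySem.Set.ofList supplies) ≤ need.keys.length := by
      unfold pvCnt; exact List.countP_le_length
    have h2 : need.keys.length = need.size := by
      simp [PySem.Dict.keys, PySem.Dict.size]
    omega
  obtain ⟨hsub, hsound, hclo⟩ :=
    pvSatLoop_spec need supplies need.items hitems hkeysmem (need.size + 1) (PySem.Set.ofList supplies) hcnt0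
  have hOsound : ∀ x ∈ O, pvMk need supplies x :=
    hsound fun x hx => pvMk.base ((PySem.Set.mem_ofList _ _).mp hx)
  have hOcomp : ∀ x, pvMk need supplies x → x ∈ O :=
    pvMk_complete need supplies O hclo fun x hx => hsub x ((PySem.Set.mem_ofList _ _).mpr hx)
  have hq : ∀ x, O.contains x = true ↔ pvMk need supplies x := by
    intro x
    rw [PySem.Set.contains_iff]
    exact ⟨hOsound x, hOcomp x⟩
  have hGoodS : pvGoodS need supplies (PySem.Set.ofList supplies) :=
    ⟨fun x hx => (PySem.Set.mem_ofList _ _).mpr hx,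
     fun x hx => pvMk.base ((PySem.Set.mem_ofList _ _).mp hx)⟩
  have hGoodN : pvGoodN need supplies [] PySem.Set.empty := fun x hx => absurd hx List.not_mem_nil
  have htop := pvTop_spec need supplies (fun x => O.contains x) hq recipes
    (PySem.Set.ofList supplies) PySem.Set.empty [] hGoodS hGoodN
  simpa using htop
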